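-- pv_equiv track=rewrite | github.com/hq5088028/MInDes-UI | build_simulation_widget.py | _is_inside_special
-- ===== SOURCE A (Python) =====
-- def _is_inside_special(text, position, symbols):
--     """检查位置是否在特殊结构内"""
--     for i in range(position):
--         if text[i] in symbols:
--             # 找到最近的配对符号
--             pair_map = {'(': ')', '[': ']', '{': '}', '$': '$'}
--             opening = text[i]
--             closing = pair_map.get(opening)
--             if closing:
--                 # 查找配对的闭合符号
--                 depth = 1
--                 for j in range(i + 1, len(text)):
--                     if text[j] == opening:
--                         depth += 1
--                     elif text[j] == closing:
--                         depth -= 1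
--                         if depth == 0:
--                             # 如果位置在这个配对内
--                             if i < position < j:
--                                 return True
--                             break
--     return False
-- ===== SOURCE B (Python) =====
-- def _is_inside_special(text, position, symbols):
--     # One pass per bracket type with a stack of opener indices (O(len(text)) total),
--     # instead of A's inner rescan from every symbol occurrence before `position`.
--     # Note: A's '$' pair entry is dead code ('$' is its own closer and A tests the
--     # opener branch first, so a '$' pair can never close), hence only the 3 brackets.
--     for opening, closing in (('(', ')'), ('[', ']'), ('{', '}')):
--         if opening in symbols:
--             stack = []
--             for j, ch in enumerate(text):
--                 if ch == opening:
--                     stack.append(j)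
--                 elif ch == closing:
--                     if stack:
--                         i = stack.pop()
--                         if i < position < j:
--                             return True
--     return False
-- ===== Notes on version B (the rewrite author's own statement) =====
-- stated objective: faster
-- what changed: Replaces A's rescan-to-the-matching-closer from every symbol occurrence before position with one left-to-right stack scan per bracket type that checks each matched pair (i,j) for i < position < j.
import Mathlib
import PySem

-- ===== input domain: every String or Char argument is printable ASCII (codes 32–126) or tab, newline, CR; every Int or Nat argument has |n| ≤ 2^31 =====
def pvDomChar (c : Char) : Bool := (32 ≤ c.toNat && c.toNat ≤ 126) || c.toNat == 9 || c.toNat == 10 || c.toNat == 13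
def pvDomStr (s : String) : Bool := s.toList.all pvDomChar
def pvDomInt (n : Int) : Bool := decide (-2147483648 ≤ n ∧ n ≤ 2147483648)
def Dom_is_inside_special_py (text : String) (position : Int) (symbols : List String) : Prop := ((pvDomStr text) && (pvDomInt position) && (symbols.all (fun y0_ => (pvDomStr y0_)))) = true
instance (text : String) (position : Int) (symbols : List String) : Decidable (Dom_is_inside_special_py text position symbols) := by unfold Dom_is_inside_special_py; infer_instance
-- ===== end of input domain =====

-- B replaces A's rescan-from-every-symbol-occurrence with one stack scan per bracket
-- type; equivalence of the return values is proved on Pre_ (position ≤ len(text)).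

-- ===== PORT A =====
-- pair_map = {'(': ')', '[': ']', '{': '}', '$': '$'}  (keys/values are 1-char strings; ported as Chars)
def pairMapA : PySem.Dict Char Char := PySem.Dict.ofList [('(', ')'), ('[', ']'), ('{', '}'), ('$', '$')]

-- inner loop: `for j in range(i+1, len(text)): …` with `depth`, early `return True` / `break`
def innerA (text : String) (opening closing : Char) (i position : Int) :
    List Int → Int → Bool
  | [], _ => false
  | j :: js, depth =>
    match PySem.Str.pyGet? text j with
    | none => false  -- IndexError (unreachable here: j < len(text))
    | some cj =>
      if cj = opening then innerA text opening closing i position js (depth + 1)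
      else if cj = closing then
        (if depth - 1 = 0 then decide (i < position ∧ position < j)
         else innerA text opening closing i position js (depth - 1))
      else innerA text opening closing i position js depth

-- outer loop: `for i in range(position): …`
def outerA (text : String) (position : Int) (symbols : List String) : List Int → Bool
  | [] => false
  | i :: is =>
    match PySem.Str.pyGet? text i with
    | none => false  -- IndexError: text[i] out of range; excluded by Pre_
    | some ch =>
      if symbols.contains (String.singleton ch) then
        match PySem.Dict.get? pairMapA ch with
        | some closing =>  -- `if closing:` — every value of pair_map is a non-empty string
          if innerA text ch closing i position
              (PySem.List.pyRange (i + 1) (PySem.Str.len text) 1) 1 then true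
          else outerA text position symbols is
        | none => outerA text position symbols is
      else outerA text position symbols is

def is_inside_special_py (text : String) (position : Int) (symbols : List String) : Bool :=
  outerA text position symbols (PySem.List.pyRange 0 position 1)

-- ===== PORT B =====
-- `for j, ch in enumerate(text)` with a stack of opener indices (head = top of stack)
def scanB (position : Int) (opening closing : Char) :
    List Char → Int → List Int → Bool
  | [], _, _ => false
  | ch :: rest, j, stack =>
    if ch = opening then scanB position opening closing rest (j + 1) (j :: stack)
    else if ch = closing then
      match stack with
      | i :: stack' =>
        if i < position ∧ position < j then true
        else scanB position opening closing rest (j + 1) stack'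
      | [] => scanB position opening closing rest (j + 1) []
    else scanB position opening closing rest (j + 1) stack

-- `for opening, closing in (('(', ')'), ('[', ']'), ('{', '}')): …`
def altGo (text : String) (position : Int) (symbols : List String) :
    List (Char × Char) → Bool
  | [] => false
  | (o, c) :: rest =>
    if symbols.contains (String.singleton o) then
      if scanB position o c text.toList 0 [] then true
      else altGo text position symbols rest
    else altGo text position symbols rest

def is_inside_special_py_alt (text : String) (position : Int) (symbols : List String) : Bool :=
  altGo text position symbols [('(', ')'), ('[', ']'), ('{', '}')]

-- ===== PRECONDITION & SPEC =====
-- Pre_ excludes exactly the inputs where A raises IndexError: whenever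
-- position > len(text) the outer loop reaches i = len(text) (it can only
-- return True at some i < position with position < j < len(text), impossible then).
def Pre_is_inside_special_py (text : String) (position : Int) (symbols : List String) : Prop :=
  position ≤ PySem.Str.len text

instance (text : String) (position : Int) (symbols : List String) :
    Decidable (Pre_is_inside_special_py text position symbols) := by
  unfold Pre_is_inside_special_py; infer_instance

def pvWitness_is_inside_special_py : String × Int × List String := ("(a)", 1, ["("])

def Spec_is_inside_special_py (text : String) (position : Int) (symbols : List String) (out : Bool) : Prop := out = is_inside_special_py_alt text position symbols
instance (text : String) (position : Int) (symbols : List String) (out : Bool) : Decidable (Spec_is_inside_special_py text position symbols out) := by unfold Spec_is_inside_special_py; infer_instance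

-- ===== CLAIM (what is proved, stated in full; the proofs are below) =====
def Claim_equal_is_inside_special_py : Prop := ∀ (text : String) (position : Int) (symbols : List String), Dom_is_inside_special_py text position symbols → Pre_is_inside_special_py text position symbols → Spec_is_inside_special_py text position symbols (is_inside_special_py text position symbols)


-- ===== LEMMAS AND PROOFS =====

-- Reference matcher: first index j (scanning cs, whose head sits at index a) where the
-- running depth (starting at `depth`) hits 0, per A's inner-loop depth rule.
def findMatch (o c : Char) : List Char → Int → Int → Option Int
  | [], _, _ => none
  | ch :: rest, a, depth =>
    if ch = o then findMatch o c rest (a + 1) (depth + 1)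
    else if ch = c then
      (if depth - 1 = 0 then some a else findMatch o c rest (a + 1) (depth - 1))
    else findMatch o c rest (a + 1) depth

-- "some opener of this type at index ≥ a lies strictly around `position` with its match"
def anyOpen (o c : Char) (pos : Int) : List Char → Int → Bool
  | [], _ => false
  | ch :: rest, a =>
    (decide (ch = o) &&
      (match findMatch o c rest (a + 1) 1 with
       | some j => decide (a < pos ∧ pos < j)
       | none => false))
    || anyOpen o c pos rest (a + 1)

-- "some entry of the pending stack gets closed strictly after `position`"
def anyPop (o c : Char) (pos : Int) (l : List Char) (a : Int) : List Int → Int → Bool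
  | [], _ => false
  | i :: st, t =>
    (match findMatch o c l a t with
     | some j => decide (i < pos ∧ pos < j)
     | none => false)
    || anyPop o c pos l a st (t + 1)

theorem findMatch_self (o : Char) (l : List Char) : ∀ (a d : Int), findMatch o o l a d = none := by
  induction l with
  | nil => intro a d; rfl
  | cons ch rest ih =>
    intro a d
    by_cases h : ch = o <;> simp [findMatch, h, ih]

theorem anyPop_nil (o c : Char) (pos a : Int) :
    ∀ (st : List Int) (t : Int), anyPop o c pos [] a st t = false := by
  intro st
  induction st with
  | nil => intro t; rfl
  | cons i st ih => intro t; simp [anyPop, findMatch, ih]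

theorem anyPop_cons_open (o c : Char) (pos : Int) (rest : List Char) (a : Int) :
    ∀ (st : List Int) (t : Int),
      anyPop o c pos (o :: rest) a st t = anyPop o c pos rest (a + 1) st (t + 1) := by
  intro st
  induction st with
  | nil => intro t; rfl
  | cons i st ih => intro t; simp [anyPop, findMatch, ih]

theorem anyPop_cons_close (o c : Char) (hne : o ≠ c) (pos : Int) (rest : List Char) (a : Int) :
    ∀ (st : List Int) (t : Int), 1 ≤ t →
      anyPop o c pos (c :: rest) a st (t + 1) = anyPop o c pos rest (a + 1) st t := by
  intro st
  induction st with
  | nil => intro t _; rfl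
  | cons i st ih =>
    intro t ht
    have h1 : (c = o) = False := by simp [Ne.symm hne]
    have h2 : (t + 1 - 1 = 0) = False := by simp; omega
    simp only [anyPop, findMatch, h1, if_false, if_true, h2]
    rw [ih (t + 1) (by omega)]
    simp

theorem anyPop_cons_other (o c ch : Char) (ho : ch ≠ o) (hc : ch ≠ c) (pos : Int)
    (rest : List Char) (a : Int) :
    ∀ (st : List Int) (t : Int),
      anyPop o c pos (ch :: rest) a st t = anyPop o c pos rest (a + 1) st t := by
  intro st
  induction st with
  | nil => intro t; rfl
  | cons i st ih => intro t; simp [anyPop, findMatch, ho, hc, ih]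

theorem scanB_eq (o c : Char) (hne : o ≠ c) (pos : Int) :
    ∀ (l : List Char) (a : Int) (st : List Int),
      scanB pos o c l a st = (anyPop o c pos l a st 1 || anyOpen o c pos l a) := by
  intro l
  induction l with
  | nil => intro a st; simp [scanB, anyOpen, anyPop_nil]
  | cons ch rest ih =>
    intro a st
    by_cases ho : ch = o
    · subst ho
      rw [show scanB pos ch c (ch :: rest) a st = scanB pos ch c rest (a + 1) (a :: st) by
            simp [scanB]]
      rw [ih (a + 1) (a :: st)]
      rw [anyPop_cons_open]
      simp only [anyPop, anyOpen, decide_true, Bool.true_and]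
      cases hm : findMatch ch c rest (a + 1) 1 with
      | none =>
        simp [hm]
      | some j =>
        simp only [hm]
        cases hd : decide (a < pos ∧ pos < j) <;>
          cases hp : anyPop ch c pos rest (a + 1) st (1 + 1) <;>
          cases hao : anyOpen ch c pos rest (a + 1) <;> simp_all
    · by_cases hc : ch = c
      · subst hc
        have hco : (ch = o) = False := by simp [ho]
        cases st with
        | nil =>
          rw [show scanB pos o ch (ch :: rest) a [] = scanB pos o ch rest (a + 1) [] by
                simp [scanB, ho]]
          rw [ih (a + 1) []]
          simp [anyPop, anyOpen, hco]
        | cons i st' =>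
          have hstep : scanB pos o ch (ch :: rest) a (i :: st') =
              (decide (i < pos ∧ pos < a) || scanB pos o ch rest (a + 1) st') := by
            by_cases h : i < pos ∧ pos < a <;> simp [scanB, ho, h]
          rw [hstep, ih (a + 1) st']
          have hpop : anyPop o ch pos (ch :: rest) a (i :: st') 1 =
              (decide (i < pos ∧ pos < a) || anyPop o ch pos rest (a + 1) st' 1) := by
            simp only [anyPop, findMatch, hco, if_false, if_true]
            have h2 := anyPop_cons_close o ch hne pos rest a st' 1 (by omega)
            norm_num at h2 ⊢
            rw [h2]
          rw [hpop]
          simp only [anyOpen, hco, decide_false, Bool.false_and, Bool.false_or]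
          cases decide (i < pos ∧ pos < a) <;>
            cases anyPop o ch pos rest (a + 1) st' 1 <;>
            cases anyOpen o ch pos rest (a + 1) <;> simp
      · rw [show scanB pos o c (ch :: rest) a st = scanB pos o c rest (a + 1) st by
              simp [scanB, ho, hc]]
        rw [ih (a + 1) st]
        rw [anyPop_cons_other o c ch ho hc]
        simp [anyOpen, ho]

theorem innerA_bridge (text : String) (o c : Char) (i pos : Int) :
    ∀ (l : List Char) (a : Int) (d : Int), 0 ≤ a → text.toList.drop a.toNat = l →
      innerA text o c i pos (PySem.List.pyRange a (PySem.Str.len text) 1) d =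
      (match findMatch o c l a d with
       | some j => decide (i < pos ∧ pos < j)
       | none => false) := by
  intro l
  induction l with
  | nil =>
    intro a d ha hdrop
    have hlen : text.toList.length ≤ a.toNat := by
      by_contra h
      have := List.drop_eq_nil_iff.mp hdrop
      omega
    have : PySem.Str.len text ≤ a := by
      rw [PySem.Str.len_eq]; omega
    rw [PySem.List.pyRange_one_eq_nil this]
    rfl
  | cons ch rest ihl =>
    intro a d ha hdrop
    have hlt : a.toNat < text.toList.length := by
      by_contra h
      rw [List.drop_eq_nil_iff.mpr (by omega)] at hdrop
      simp at hdrop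
    have haln : a < PySem.Str.len text := by rw [PySem.Str.len_eq]; omega
    rw [PySem.List.pyRange_one_cons haln]
    have hget : PySem.Str.pyGet? text a = some ch := by
      have h2 : PySem.Str.pyGet? text ((a.toNat : Nat) : Int) = text.toList[a.toNat]? :=
        PySem.Str.pyGet?_natCast text a.toNat
      rw [show ((a.toNat : Nat) : Int) = a by omega] at h2
      rw [h2, ← List.head?_drop, hdrop]
      rfl
    have hdrop' : text.toList.drop (a + 1).toNat = rest := by
      have : (a + 1).toNat = a.toNat + 1 := by omega
      rw [this, ← List.drop_drop, hdrop]
      rfl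
    simp only [innerA, hget, findMatch]
    by_cases h1 : ch = o
    · rw [if_pos h1, if_pos h1, ihl (a + 1) (d + 1) (by omega) hdrop']
    · rw [if_neg h1, if_neg h1]
      by_cases h2 : ch = c
      · rw [if_pos h2, if_pos h2]
        by_cases h3 : d - 1 = 0
        · rw [if_pos h3, if_pos h3]
        · rw [if_neg h3, if_neg h3, ihl (a + 1) (d - 1) (by omega) hdrop']
      · rw [if_neg h2, if_neg h2, ihl (a + 1) d (by omega) hdrop']

theorem anyOpen_false_of_ge (o c : Char) (pos : Int) :
    ∀ (l : List Char) (a : Int), pos ≤ a → anyOpen o c pos l a = false := by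
  intro l
  induction l with
  | nil => intro a _; rfl
  | cons ch rest ih =>
    intro a hpa
    simp only [anyOpen, ih (a + 1) (by omega), Bool.or_false]
    cases hm : findMatch o c rest (a + 1) 1 with
    | none => simp
    | some j => simp; omega

theorem outerA_split (text : String) (pos : Int) (syms : List String)
    (hpre : pos ≤ PySem.Str.len text) :
    ∀ (l : List Char) (a : Int), 0 ≤ a → text.toList.drop a.toNat = l →
      outerA text pos syms (PySem.List.pyRange a pos 1) =
      ((syms.contains "(" && anyOpen '(' ')' pos l a) ||
       (syms.contains "[" && anyOpen '[' ']' pos l a) ||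
       (syms.contains "{" && anyOpen '{' '}' pos l a)) := by
  intro l
  induction l with
  | nil =>
    intro a ha hdrop
    have hlen : text.toList.length ≤ a.toNat := by
      by_contra h
      have := List.drop_eq_nil_iff.mp hdrop
      omega
    have hpa : pos ≤ a := by
      rw [PySem.Str.len_eq] at hpre; omega
    rw [PySem.List.pyRange_one_eq_nil hpa]
    simp [outerA, anyOpen]
  | cons ch rest ihl =>
    intro a ha hdrop
    by_cases hpa : pos ≤ a
    · rw [PySem.List.pyRange_one_eq_nil hpa]
      simp [outerA, anyOpen_false_of_ge _ _ _ _ _ hpa]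
    · rw [not_le] at hpa
      rw [PySem.List.pyRange_one_cons hpa]
      have hlt : a.toNat < text.toList.length := by
        by_contra h
        rw [List.drop_eq_nil_iff.mpr (by omega)] at hdrop
        simp at hdrop
      have hget : PySem.Str.pyGet? text a = some ch := by
        have h2 : PySem.Str.pyGet? text ((a.toNat : Nat) : Int) = text.toList[a.toNat]? :=
          PySem.Str.pyGet?_natCast text a.toNat
        rw [show ((a.toNat : Nat) : Int) = a by omega] at h2
        rw [h2, ← List.head?_drop, hdrop]
        rfl
      have hdrop' : text.toList.drop (a + 1).toNat = rest := by
        have : (a + 1).toNat = a.toNat + 1 := by omega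
        rw [this, ← List.drop_drop, hdrop]
        rfl
      have ih := ihl (a + 1) (by omega) hdrop'
      simp only [outerA, hget]
      -- contribution of index a, by cases on the character
      by_cases h1 : ch = '('
      · subst h1
        have hpm : PySem.Dict.get? pairMapA '(' = some ')' := by decide
        have hsing : String.singleton '(' = "(" := by decide
        rw [hsing]
        simp only [hpm]
        rw [innerA_bridge text '(' ')' a pos rest (a + 1) 1 (by omega) hdrop']
        simp only [anyOpen, decide_true, Bool.true_and, ih,
          show (('(' : Char) = '[') = False by decide,
          show (('(' : Char) = '{') = False by decide, decide_false, Bool.false_and,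
          Bool.false_or]
        cases hm : findMatch '(' ')' rest (a + 1) 1 with
        | none =>
          cases syms.contains "(" <;> simp
        | some j =>
          cases hc1 : syms.contains "(" <;>
            cases hd : decide (a < pos ∧ pos < j) <;>
            cases anyOpen '(' ')' pos rest (a + 1) <;> simp_all [Bool.or_assoc, Bool.or_comm, Bool.or_left_comm]
      · by_cases h2 : ch = '['
        · subst h2
          have hpm : PySem.Dict.get? pairMapA '[' = some ']' := by decide
          have hsing : String.singleton '[' = "[" := by decide
          rw [hsing]
          simp only [hpm]
          rw [innerA_bridge text '[' ']' a pos rest (a + 1) 1 (by omega) hdrop']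
          simp only [anyOpen, decide_true, Bool.true_and, ih,
            show (('[' : Char) = '(') = False by decide,
            show (('[' : Char) = '{') = False by decide, decide_false, Bool.false_and,
            Bool.false_or]
          cases hm : findMatch '[' ']' rest (a + 1) 1 with
          | none =>
            cases syms.contains "[" <;> simp
          | some j =>
            cases hc1 : syms.contains "[" <;>
              cases hd : decide (a < pos ∧ pos < j) <;>
              cases anyOpen '[' ']' pos rest (a + 1) <;> simp_all [Bool.or_assoc, Bool.or_comm, Bool.or_left_comm]
        · by_cases h3 : ch = '{'
          · subst h3
            have hpm : PySem.Dict.get? pairMapA '{' = some '}' := by decide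
            have hsing : String.singleton '{' = "{" := by decide
            rw [hsing]
            simp only [hpm]
            rw [innerA_bridge text '{' '}' a pos rest (a + 1) 1 (by omega) hdrop']
            simp only [anyOpen, decide_true, Bool.true_and, ih,
              show (('{' : Char) = '(') = False by decide,
              show (('{' : Char) = '[') = False by decide, decide_false, Bool.false_and,
              Bool.false_or]
            cases hm : findMatch '{' '}' rest (a + 1) 1 with
            | none =>
              cases syms.contains "{" <;> simp
            | some j =>
              cases hc1 : syms.contains "{" <;>
                cases hd : decide (a < pos ∧ pos < j) <;>
                cases anyOpen '{' '}' pos rest (a + 1) <;> simp_all [Bool.or_assoc, Bool.or_comm, Bool.or_left_comm]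
          · by_cases h4 : ch = '$'
            · subst h4
              have hpm : PySem.Dict.get? pairMapA '$' = some '$' := by decide
              simp only [hpm]
              rw [innerA_bridge text '$' '$' a pos rest (a + 1) 1 (by omega) hdrop']
              rw [findMatch_self]
              simp only [anyOpen, ih,
                show (('$' : Char) = '(') = False by decide,
                show (('$' : Char) = '[') = False by decide,
                show (('$' : Char) = '{') = False by decide, decide_false, Bool.false_and,
                Bool.false_or]
              cases syms.contains (String.singleton '$') <;> simp
            · have hpm : PySem.Dict.get? pairMapA ch = none := by
                rw [PySem.Dict.get?_eq_none_iff_not_mem_keys]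
                rw [show pairMapA.keys = ['(', '[', '{', '$'] from by decide]
                simp [h1, h2, h3, h4]
              simp only [hpm]
              simp only [anyOpen, ih, h1, h2, h3, decide_false, Bool.false_and,
                Bool.false_or]
              cases syms.contains (String.singleton ch) <;> simp [h1, h2, h3]

theorem altB_split (text : String) (pos : Int) (syms : List String) :
    is_inside_special_py_alt text pos syms =
    ((syms.contains "(" && scanB pos '(' ')' text.toList 0 []) ||
     (syms.contains "[" && scanB pos '[' ']' text.toList 0 []) ||
     (syms.contains "{" && scanB pos '{' '}' text.toList 0 [])) := by
  have h1 : String.singleton '(' = "(" := by decide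
  have h2 : String.singleton '[' = "[" := by decide
  have h3 : String.singleton '{' = "{" := by decide
  simp only [is_inside_special_py_alt, altGo, h1, h2, h3]
  cases syms.contains "(" <;> cases syms.contains "[" <;> cases syms.contains "{" <;>
    cases scanB pos '(' ')' text.toList 0 [] <;>
    cases scanB pos '[' ']' text.toList 0 [] <;>
    cases scanB pos '{' '}' text.toList 0 [] <;> simp

-- ===== VERDICT (by name: the statement is the Claim_ definition above) =====
theorem is_inside_special_py_spec : Claim_equal_is_inside_special_py := by
  intro text pos syms _ hpre
  unfold Spec_is_inside_special_py
  unfold is_inside_special_py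
  rw [outerA_split text pos syms hpre text.toList 0 (by omega) (by simp)]
  rw [altB_split]
  rw [scanB_eq '(' ')' (by decide) pos text.toList 0 []]
  rw [scanB_eq '[' ']' (by decide) pos text.toList 0 []]
  rw [scanB_eq '{' '}' (by decide) pos text.toList 0 []]
  simp [anyPop]
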